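-- pv_equiv track=rewrite | github.com/imeromua/generator_bot | handlers/user_parts/schedule.py | _schedule_to_ranges
-- ===== SOURCE A (Python) =====
-- def _schedule_to_ranges(schedule: dict) -> list[tuple[int, int]]:
--     ranges: list[tuple[int, int]] = []
--     start = None
--     for h in range(24):
--         off = int(schedule.get(h, 0) or 0) == 1
--         if off and start is None:
--             start = h
--         if (not off) and start is not None:
--             ranges.append((start, h))
--             start = None
--
--     if start is not None:
--         ranges.append((start, 24))
--
--     return ranges
-- ===== SOURCE B (Python) =====
-- def _schedule_to_ranges(schedule: dict) -> list[tuple[int, int]]: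
--     offs = [int(schedule.get(h, 0) or 0) == 1 for h in range(24)]
--     starts = [h for h in range(24) if offs[h] and (h == 0 or not offs[h - 1])]
--     ends = [h + 1 for h in range(24) if offs[h] and (h == 23 or not offs[h + 1])]
--     return list(zip(starts, ends))
-- ===== Notes on version B (the rewrite author's own statement) =====
-- stated objective: alternative
-- what changed: Replaces the stateful 24-hour scan carrying a mutable start sentinel with a declarative formulation: precompute the 24 off-flags, pick out run starts and run ends by local boundary tests, and zip them into ranges.
import Mathlib
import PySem

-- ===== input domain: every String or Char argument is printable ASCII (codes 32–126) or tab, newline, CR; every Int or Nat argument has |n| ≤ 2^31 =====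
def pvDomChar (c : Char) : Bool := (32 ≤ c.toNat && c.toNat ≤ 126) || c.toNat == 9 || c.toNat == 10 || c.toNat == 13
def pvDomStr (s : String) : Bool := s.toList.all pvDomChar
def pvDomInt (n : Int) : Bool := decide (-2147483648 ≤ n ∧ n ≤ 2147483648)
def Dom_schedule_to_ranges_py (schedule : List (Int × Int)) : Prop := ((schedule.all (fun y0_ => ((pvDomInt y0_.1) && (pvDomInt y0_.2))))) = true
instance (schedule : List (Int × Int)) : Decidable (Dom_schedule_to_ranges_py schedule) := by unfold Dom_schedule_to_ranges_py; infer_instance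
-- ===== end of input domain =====

-- B replaces A's stateful hour scan (mutable `start` sentinel) by a declarative
-- formulation: compute the 24 off-flags, then zip run starts with run ends found by local boundary tests.

-- ===== PORT A =====
-- literal transliteration of A's loop: state = (ranges, start)
def schedule_to_ranges_py (schedule : List (Int × Int)) : List (Int × Int) :=
  let d := PySem.Dict.ofList schedule
  let st := (PySem.List.pyRange 0 24 1).foldl
    (fun (st : List (Int × Int) × Option Int) (h : Int) =>
      let v := d.getD h 0
      let off : Bool := ((if v = 0 then (0 : Int) else v) == 1)   -- int(schedule.get(h,0) or 0) == 1
      let st1 := if off = true ∧ st.2 = none then (st.1, some h) else st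
      match off, st1.2 with
      | false, some s => (st1.1 ++ [(s, h)], none)
      | _, _ => st1)
    ([], none)
  match st.2 with
  | some s => st.1 ++ [(s, 24)]
  | none => st.1

-- ===== PORT B =====
-- off-test for one hour: int(schedule.get(h, 0) or 0) == 1
def pvOff (schedule : List (Int × Int)) (h : Int) : Bool :=
  let v := (PySem.Dict.ofList schedule).getD h 0
  ((if v = 0 then (0 : Int) else v) == 1)

def schedule_to_ranges_py_alt (schedule : List (Int × Int)) : List (Int × Int) :=
  let offs : List Bool := (PySem.List.pyRange 0 24 1).map (fun h => pvOff schedule h)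
  let starts := (PySem.List.pyRange 0 24 1).filter
    (fun h => PySem.List.pyGetD offs h false && (h == 0 || !(PySem.List.pyGetD offs (h - 1) false)))
  let ends := ((PySem.List.pyRange 0 24 1).filter
    (fun h => PySem.List.pyGetD offs h false && (h == 23 || !(PySem.List.pyGetD offs (h + 1) false)))).map
    (fun h => h + 1)
  starts.zip ends

-- ===== PRECONDITION & SPEC =====
def Spec_schedule_to_ranges_py (schedule : List (Int × Int)) (out : List (Int × Int)) : Prop := out = schedule_to_ranges_py_alt schedule
instance (schedule : List (Int × Int)) (out : List (Int × Int)) : Decidable (Spec_schedule_to_ranges_py schedule out) := by unfold Spec_schedule_to_ranges_py; infer_instance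

-- ===== CLAIM (what is proved, stated in full; the proofs are below) =====
def Claim_equal_schedule_to_ranges_py : Prop := ∀ (schedule : List (Int × Int)), Dom_schedule_to_ranges_py schedule → Spec_schedule_to_ranges_py schedule (schedule_to_ranges_py schedule)

-- ===== LEMMAS AND PROOFS =====

-- A's loop body, abstracted over the per-hour off-test
def pvStep (f : Int → Bool) (st : List (Int × Int) × Option Int) (h : Int) : List (Int × Int) × Option Int :=
  let off : Bool := f h
  let st1 := if off = true ∧ st.2 = none then (st.1, some h) else st
  match off, st1.2 with
  | false, some s => (st1.1 ++ [(s, h)], none)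
  | _, _ => st1

-- run starts over hours [0, n), and closed run ends (h with f h and not f (h+1)) over [0, n)
def pvS (f : Int → Bool) (n : Int) : List Int :=
  (PySem.List.pyRange 0 n 1).filter (fun h => f h && (h == 0 || !f (h - 1)))
def pvE (f : Int → Bool) (n : Int) : List Int :=
  (PySem.List.pyRange 0 n 1).filter (fun h => f h && !f (h + 1))

lemma pvS_succ (f : Int → Bool) (k : Int) (hk : 0 ≤ k) :
    pvS f (k + 1) = pvS f k ++ (if (f k && ((k == 0) || !f (k - 1))) = true then [k] else []) := by
  unfold pvS
  rw [PySem.List.pyRange_one_succ_right hk, List.filter_append]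
  cases h : f k && ((k == 0) || !f (k - 1)) <;> simp [List.filter, h]

lemma pvE_succ (f : Int → Bool) (k : Int) (hk : 0 ≤ k) :
    pvE f (k + 1) = pvE f k ++ (if (f k && !f (k + 1)) = true then [k] else []) := by
  unfold pvE
  rw [PySem.List.pyRange_one_succ_right hk, List.filter_append]
  cases h : f k && !f (k + 1) <;> simp [List.filter, h]

lemma pvStep_tn (f : Int → Bool) (R : List (Int × Int)) (k : Int) (hf : f k = true) :
    pvStep f (R, none) k = (R, some k) := by simp [pvStep, hf]
lemma pvStep_ts (f : Int → Bool) (R : List (Int × Int)) (s k : Int) (hf : f k = true) :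
    pvStep f (R, some s) k = (R, some s) := by simp [pvStep, hf]
lemma pvStep_fn (f : Int → Bool) (R : List (Int × Int)) (k : Int) (hf : f k = false) :
    pvStep f (R, none) k = (R, none) := by simp [pvStep, hf]
lemma pvStep_fs (f : Int → Bool) (R : List (Int × Int)) (s k : Int) (hf : f k = false) :
    pvStep f (R, some s) k = (R ++ [(s, k)], none) := by simp [pvStep, hf]

-- the loop invariant of A's scan: after hours [0, n) the state is either closed
-- (no run open, ranges = starts zipped with closed ends) or open (a run open since s,
-- ranges = all but the last start zipped with the closed ends before the run)
lemma pv_inv (f : Int → Bool) (n : Nat) :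
    ( ((n : Int) = 0 ∨ f ((n : Int) - 1) = false)
      ∧ (pvS f n).length = (pvE f n).length
      ∧ (PySem.List.pyRange 0 n 1).foldl (pvStep f) ([], none)
          = ((pvS f n).zip ((pvE f n).map (· + 1)), none) )
    ∨ ( 0 < n ∧ f ((n : Int) - 1) = true
      ∧ ∃ s Sc, pvS f n = Sc ++ [s]
          ∧ Sc.length = (pvE f ((n : Int) - 1)).length
          ∧ (PySem.List.pyRange 0 n 1).foldl (pvStep f) ([], none)
              = (Sc.zip ((pvE f ((n : Int) - 1)).map (· + 1)), some s) ) := by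
  induction n with
  | zero =>
    left
    refine ⟨Or.inl rfl, ?_, ?_⟩ <;>
      simp [pvS, pvE, PySem.List.pyRange_one_eq_nil (by omega : (0:Int) ≤ 0)]
  | succ n ih =>
    have hcast : ((n + 1 : Nat) : Int) = (n : Int) + 1 := by push_cast; ring
    have hsplit : PySem.List.pyRange 0 ((n + 1 : Nat) : Int) 1
        = PySem.List.pyRange 0 (n : Int) 1 ++ [(n : Int)] := by
      rw [hcast, PySem.List.pyRange_one_succ_right (by positivity)]
    have hS := pvS_succ f (n : Int) (by positivity)
    have hE := pvE_succ f (n : Int) (by positivity)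
    rw [hsplit, List.foldl_append]
    rcases ih with ⟨hprev, hlen, heq⟩ | ⟨hpos, hprev, s, Sc, hSc, hlen, heq⟩
    · -- closed at n
      rw [heq]
      cases hf : f (n : Int) with
      | false =>
        left
        rw [List.foldl_cons, List.foldl_nil, pvStep_fn f _ _ hf]
        have hS' : pvS f ((n:Int) + 1) = pvS f n := by rw [hS]; simp [hf]
        have hE' : pvE f ((n:Int) + 1) = pvE f n := by rw [hE]; simp [hf]
        rw [hcast, hS', hE']
        refine ⟨Or.inr ?_, hlen, rfl⟩
        simpa using hf
      | true =>
        right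
        rw [List.foldl_cons, List.foldl_nil, pvStep_tn f _ _ hf]
        have hcond : (f (n:Int) && (((n:Int) == 0) || !f ((n:Int) - 1))) = true := by
          simp only [hf, Bool.true_and]
          rcases hprev with h0 | hfp
          · simp [h0]
          · simp [hfp]
        have hS' : pvS f ((n:Int) + 1) = pvS f n ++ [(n:Int)] := by rw [hS, if_pos hcond]
        rw [hcast]
        refine ⟨by omega, ?_, (n:Int), pvS f n, ?_, ?_, ?_⟩
        · simpa using hf
        · exact hS'
        · simp only [add_sub_cancel_right]; exact hlen
        · simp only [add_sub_cancel_right]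
    · -- open at n
      have hn0 : ((n:Int) == 0) = false := by simp; omega
      rw [heq]
      cases hf : f (n : Int) with
      | true =>
        right
        rw [List.foldl_cons, List.foldl_nil, pvStep_ts f _ _ _ hf]
        have hS' : pvS f ((n:Int) + 1) = pvS f n := by
          rw [hS]; simp [hn0, hprev]
        have hEn : pvE f (n : Int) = pvE f ((n:Int) - 1) := by
          have := pvE_succ f ((n:Int) - 1) (by omega)
          simp only [sub_add_cancel] at this
          rw [this]
          simp [hprev, hf]
        rw [hcast]
        refine ⟨by omega, ?_, s, Sc, ?_, ?_, ?_⟩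
        · simpa using hf
        · rw [hS', hSc]
        · simp only [add_sub_cancel_right]; rw [hEn]; exact hlen
        · simp only [add_sub_cancel_right, hEn]
      | false =>
        left
        rw [List.foldl_cons, List.foldl_nil, pvStep_fs f _ _ _ hf]
        have hS' : pvS f ((n:Int) + 1) = pvS f n := by rw [hS]; simp [hf]
        have hEn : pvE f (n : Int) = pvE f ((n:Int) - 1) ++ [(n:Int) - 1] := by
          have := pvE_succ f ((n:Int) - 1) (by omega)
          simp only [sub_add_cancel] at this
          rw [this]
          simp [hprev, hf]
        have hE' : pvE f ((n:Int) + 1) = pvE f ((n:Int) - 1) ++ [(n:Int) - 1] := by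
          rw [hE]; simp [hf, hEn]
        have hzip : (Sc ++ [s]).zip (((pvE f ((n:Int) - 1)) ++ [(n:Int) - 1]).map (· + 1))
            = Sc.zip ((pvE f ((n:Int) - 1)).map (· + 1)) ++ [(s, (n:Int))] := by
          rw [List.map_append]
          rw [List.zip_append (by simpa using hlen)]
          simp
        rw [hcast]
        refine ⟨Or.inr ?_, ?_, ?_⟩
        · simpa using hf
        · rw [hS', hSc, hE']
          simp only [List.length_append, List.length_singleton] at hlen ⊢
          omega
        · rw [hS', hSc, hE', hzip]

lemma portA_eq (schedule : List (Int × Int)) :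
    schedule_to_ranges_py schedule =
      (let st := (PySem.List.pyRange 0 24 1).foldl (pvStep (pvOff schedule)) ([], none)
       match st.2 with
       | some s => st.1 ++ [(s, 24)]
       | none => st.1) := rfl

lemma portB_eq (schedule : List (Int × Int)) :
    schedule_to_ranges_py_alt schedule =
      (pvS (pvOff schedule) 24).zip
        (((PySem.List.pyRange 0 24 1).filter
            (fun h => pvOff schedule h && ((h == 23) || !pvOff schedule (h + 1)))).map (· + 1)) := by
  have hs : (PySem.List.pyRange 0 (24:Int) 1).filter
      (fun h => PySem.List.pyGetD ((PySem.List.pyRange 0 24 1).map (fun h => pvOff schedule h)) h false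
        && (h == 0 || !(PySem.List.pyGetD ((PySem.List.pyRange 0 24 1).map (fun h => pvOff schedule h)) (h - 1) false)))
      = pvS (pvOff schedule) 24 := by
    unfold pvS
    apply List.filter_congr
    intro h hm
    rw [PySem.List.mem_pyRange_one] at hm
    rw [PySem.List.pyGetD_map_pyRange_of_nonneg _ _ _ _ hm.1 hm.2]
    by_cases h0 : h = 0
    · simp [h0]
    · have e : (h == 0) = false := by simp [h0]
      rw [e, PySem.List.pyGetD_map_pyRange_of_nonneg _ _ _ _ (by omega) (by omega)]
  have he : (PySem.List.pyRange 0 (24:Int) 1).filter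
      (fun h => PySem.List.pyGetD ((PySem.List.pyRange 0 24 1).map (fun h => pvOff schedule h)) h false
        && (h == 23 || !(PySem.List.pyGetD ((PySem.List.pyRange 0 24 1).map (fun h => pvOff schedule h)) (h + 1) false)))
      = (PySem.List.pyRange 0 (24:Int) 1).filter
          (fun h => pvOff schedule h && ((h == 23) || !pvOff schedule (h + 1))) := by
    apply List.filter_congr
    intro h hm
    rw [PySem.List.mem_pyRange_one] at hm
    rw [PySem.List.pyGetD_map_pyRange_of_nonneg _ _ _ _ hm.1 hm.2]
    by_cases h23 : h = 23
    · simp [h23]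
    · have e : (h == 23) = false := by simp [h23]
      rw [e, PySem.List.pyGetD_map_pyRange_of_nonneg _ _ _ _ (by omega) (by omega)]
  show ((PySem.List.pyRange 0 (24:Int) 1).filter _).zip (((PySem.List.pyRange 0 (24:Int) 1).filter _).map _) = _
  rw [hs, he]

lemma pvEnd_eq (f : Int → Bool) :
    (PySem.List.pyRange 0 24 1).filter (fun h => f h && ((h == 23) || !f (h + 1)))
      = pvE f 23 ++ (if f 23 = true then [(23 : Int)] else []) := by
  have hr : (PySem.List.pyRange 0 (24:Int) 1) = PySem.List.pyRange 0 23 1 ++ [(23:Int)] := by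
    have h := PySem.List.pyRange_one_succ_right (a := (0:Int)) (b := 23) (by omega)
    norm_num at h ⊢; exact h
  rw [hr, List.filter_append]
  have h1 : (PySem.List.pyRange 0 (23:Int) 1).filter (fun h => f h && ((h == 23) || !f (h + 1))) = pvE f 23 := by
    unfold pvE
    apply List.filter_congr
    intro h hm
    rw [PySem.List.mem_pyRange_one] at hm
    have e : (h == 23) = false := by simp; omega
    rw [e]; simp
  have h2 : List.filter (fun h => f h && ((h == 23) || !f (h + 1))) [(23:Int)] = if f 23 = true then [(23:Int)] else [] := by
    cases h : f 23 <;> simp [List.filter, h]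
  rw [h1, h2]

-- pvE over 24 hours agrees with pvE over 23 hours when hour 23 is not off
lemma pvE24 (f : Int → Bool) (hf : f 23 = false) : pvE f 24 = pvE f 23 := by
  have h := pvE_succ f 23 (by omega)
  norm_num [hf] at h
  exact h

-- ===== VERDICT (by name: the statement is the Claim_ definition above) =====
theorem schedule_to_ranges_py_spec : Claim_equal_schedule_to_ranges_py := by
  intro schedule _
  unfold Spec_schedule_to_ranges_py
  rw [portA_eq, portB_eq, pvEnd_eq]
  have hinv := pv_inv (pvOff schedule) 24
  norm_num at hinv
  rcases hinv with ⟨hprev, hlen, heq⟩ | ⟨hf23, s, Sc, hSc, hlen, heq⟩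
  · -- no run open at the end
    rw [heq]
    simp only []
    rw [pvE24 _ hprev, if_neg (by simp [hprev])]
    simp
  · -- a run open at the end: A appends (s, 24), B's last end is 23 + 1
    rw [heq]
    simp only []
    rw [if_pos hf23, hSc, List.map_append]
    rw [List.zip_append (by simpa using hlen)]
    norm_num
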